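-- pv_equiv track=rewrite | github.com/DomingoRomanMontesDeOca/transcriptor_fonologico_2024 | transcriptor_2022.py | contador_palabras
-- ===== SOURCE A (Python) =====
-- def contador_palabras(lista_compleja_palabras):
--     total_palabras = len(lista_compleja_palabras)
--
--     contador_tonicas = 0
--     contador_atonas = 0
--
--     contador_atonas_monosilabas = 0
--     contador_tonicas_monosilabas = 0
--     contador_bisilabas_atonas = 0
--
--     contador_sobresdrujulas = 0
--     contador_esdrujulas = 0
--     contador_graves = 0
--     contador_agudas = 0
--
--     for palabra in lista_compleja_palabras:
--         if True == palabra[2]: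
--             contador_tonicas = contador_tonicas + 1
--             if palabra[5] == 1:
--                 contador_tonicas_monosilabas = contador_tonicas_monosilabas + 1
--             elif palabra[5] > 1:
--                 if palabra[3] == "-4":
--                     contador_sobresdrujulas = contador_sobresdrujulas + 1
--                 elif palabra[3] == "-3":
--                     contador_esdrujulas = contador_esdrujulas + 1
--                 elif palabra[3] == "-2":
--                     contador_graves = contador_graves + 1
--                 elif palabra[3] == "-1":
--                     contador_agudas = contador_agudas + 1
--
--         elif False == palabra[2]:
--             contador_atonas = contador_atonas + 1
--             if palabra[5] == 1:
--                 contador_atonas_monosilabas = contador_atonas_monosilabas + 1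
--             elif palabra[5] == 2:
--                 contador_bisilabas_atonas = contador_bisilabas_atonas + 1
--
--     return total_palabras, contador_atonas, contador_tonicas, contador_bisilabas_atonas, contador_atonas_monosilabas, \
--            contador_tonicas_monosilabas, contador_agudas, contador_graves, contador_esdrujulas, contador_sobresdrujulas
-- ===== SOURCE B (Python) =====
-- def contador_palabras(lista_compleja_palabras):
--     L = lista_compleja_palabras
--     tonicas = sum(1 for p in L if True == p[2])
--     atonas = sum(1 for p in L if False == p[2])
--     atonas_monosilabas = sum(1 for p in L if False == p[2] and p[5] == 1)
--     tonicas_monosilabas = sum(1 for p in L if True == p[2] and p[5] == 1)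
--     bisilabas_atonas = sum(1 for p in L if False == p[2] and p[5] == 2)
--     sobresdrujulas = sum(1 for p in L if True == p[2] and p[5] > 1 and p[3] == "-4")
--     esdrujulas = sum(1 for p in L if True == p[2] and p[5] > 1 and p[3] == "-3")
--     graves = sum(1 for p in L if True == p[2] and p[5] > 1 and p[3] == "-2")
--     agudas = sum(1 for p in L if True == p[2] and p[5] > 1 and p[3] == "-1")
--     return (len(L), atonas, tonicas, bisilabas_atonas, atonas_monosilabas,
--             tonicas_monosilabas, agudas, graves, esdrujulas, sobresdrujulas)
-- ===== Notes on version B (the rewrite author's own statement) =====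
-- stated objective: simpler
-- what changed: Replaced the single stateful loop with nine counters and nested branches by one independent countP-style generator-expression sum per counter (plus len for the total), each with a flat predicate.
import Mathlib
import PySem

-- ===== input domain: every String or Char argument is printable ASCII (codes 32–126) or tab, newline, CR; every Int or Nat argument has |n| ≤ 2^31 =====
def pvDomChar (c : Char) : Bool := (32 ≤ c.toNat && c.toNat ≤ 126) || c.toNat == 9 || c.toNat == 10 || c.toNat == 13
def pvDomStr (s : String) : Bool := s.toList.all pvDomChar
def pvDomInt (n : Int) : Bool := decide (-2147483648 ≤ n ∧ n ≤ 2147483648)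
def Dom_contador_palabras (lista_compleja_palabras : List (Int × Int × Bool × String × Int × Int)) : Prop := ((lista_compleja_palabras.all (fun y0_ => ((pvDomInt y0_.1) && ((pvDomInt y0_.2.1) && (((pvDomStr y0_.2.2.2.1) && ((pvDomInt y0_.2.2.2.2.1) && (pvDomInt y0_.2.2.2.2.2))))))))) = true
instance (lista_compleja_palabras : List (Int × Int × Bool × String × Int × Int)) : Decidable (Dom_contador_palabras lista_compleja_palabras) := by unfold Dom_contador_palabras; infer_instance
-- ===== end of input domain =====

-- B replaces A's single stateful loop (nine counters, nested branches) by one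
-- independent flat-predicate count per statistic; same O(n) cost, plainer code.

-- ===== PORT A =====
-- A's loop body: updates the 9 counters (atonas, tonicas, bisilabas_atonas,
-- atonas_monosilabas, tonicas_monosilabas, agudas, graves, esdrujulas, sobresdrujulas)
def contadorStep : (Int × Int × Int × Int × Int × Int × Int × Int × Int) →
    (Int × Int × Bool × String × Int × Int) →
    Int × Int × Int × Int × Int × Int × Int × Int × Int
  | (at_, to_, bi, am, tm, ag, gr, es, so), (_, _, b, tilde, _, sil) =>
    if true = b then
      let to_ := to_ + 1
      if sil = 1 then (at_, to_, bi, am, tm + 1, ag, gr, es, so)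
      else if sil > 1 then
        if tilde = "-4" then (at_, to_, bi, am, tm, ag, gr, es, so + 1)
        else if tilde = "-3" then (at_, to_, bi, am, tm, ag, gr, es + 1, so)
        else if tilde = "-2" then (at_, to_, bi, am, tm, ag, gr + 1, es, so)
        else if tilde = "-1" then (at_, to_, bi, am, tm, ag + 1, gr, es, so)
        else (at_, to_, bi, am, tm, ag, gr, es, so)
      else (at_, to_, bi, am, tm, ag, gr, es, so)
    else if false = b then
      let at_ := at_ + 1
      if sil = 1 then (at_, to_, bi, am + 1, tm, ag, gr, es, so)
      else if sil = 2 then (at_, to_, bi + 1, am, tm, ag, gr, es, so)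
      else (at_, to_, bi, am, tm, ag, gr, es, so)
    else (at_, to_, bi, am, tm, ag, gr, es, so)

def contador_palabras (lista_compleja_palabras : List (Int × Int × Bool × String × Int × Int)) : Int × Int × Int × Int × Int × Int × Int × Int × Int × Int :=
  let total_palabras : Int := lista_compleja_palabras.length
  let (at_, to_, bi, am, tm, ag, gr, es, so) :=
    lista_compleja_palabras.foldl contadorStep (0, 0, 0, 0, 0, 0, 0, 0, 0)
  (total_palabras, at_, to_, bi, am, tm, ag, gr, es, so)

-- ===== PORT B =====
def cuenta (L : List (Int × Int × Bool × String × Int × Int))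
    (p : (Int × Int × Bool × String × Int × Int) → Bool) : Int :=
  (L.countP p : Nat)

def contador_palabras_alt (lista_compleja_palabras : List (Int × Int × Bool × String × Int × Int)) : Int × Int × Int × Int × Int × Int × Int × Int × Int × Int :=
  let L := lista_compleja_palabras
  let tonicas := cuenta L (fun p => true == p.2.2.1)
  let atonas := cuenta L (fun p => false == p.2.2.1)
  let atonas_monosilabas := cuenta L (fun p => false == p.2.2.1 && p.2.2.2.2.2 == 1)
  let tonicas_monosilabas := cuenta L (fun p => true == p.2.2.1 && p.2.2.2.2.2 == 1)
  let bisilabas_atonas := cuenta L (fun p => false == p.2.2.1 && p.2.2.2.2.2 == 2)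
  let sobresdrujulas := cuenta L (fun p => true == p.2.2.1 && p.2.2.2.2.2 > 1 && p.2.2.2.1 == "-4")
  let esdrujulas := cuenta L (fun p => true == p.2.2.1 && p.2.2.2.2.2 > 1 && p.2.2.2.1 == "-3")
  let graves := cuenta L (fun p => true == p.2.2.1 && p.2.2.2.2.2 > 1 && p.2.2.2.1 == "-2")
  let agudas := cuenta L (fun p => true == p.2.2.1 && p.2.2.2.2.2 > 1 && p.2.2.2.1 == "-1")
  ((L.length : Int), atonas, tonicas, bisilabas_atonas, atonas_monosilabas,
   tonicas_monosilabas, agudas, graves, esdrujulas, sobresdrujulas)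

-- ===== PRECONDITION & SPEC =====
-- DecidableEq for the 10-tuple result, built stepwise (plain nested instance search is too slow)
def pvDecEq2 : DecidableEq (Int × Int) := instDecidableEqProd
def pvDecEq3 : DecidableEq (Int × Int × Int) := @instDecidableEqProd _ _ _ pvDecEq2
def pvDecEq4 : DecidableEq (Int × Int × Int × Int) := @instDecidableEqProd _ _ _ pvDecEq3
def pvDecEq5 : DecidableEq (Int × Int × Int × Int × Int) := @instDecidableEqProd _ _ _ pvDecEq4
def pvDecEq6 : DecidableEq (Int × Int × Int × Int × Int × Int) := @instDecidableEqProd _ _ _ pvDecEq5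
def pvDecEq7 : DecidableEq (Int × Int × Int × Int × Int × Int × Int) := @instDecidableEqProd _ _ _ pvDecEq6
def pvDecEq8 : DecidableEq (Int × Int × Int × Int × Int × Int × Int × Int) := @instDecidableEqProd _ _ _ pvDecEq7
def pvDecEq9 : DecidableEq (Int × Int × Int × Int × Int × Int × Int × Int × Int) := @instDecidableEqProd _ _ _ pvDecEq8
def pvDecEq10 : DecidableEq (Int × Int × Int × Int × Int × Int × Int × Int × Int × Int) := @instDecidableEqProd _ _ _ pvDecEq9

def Spec_contador_palabras (lista_compleja_palabras : List (Int × Int × Bool × String × Int × Int)) (out : Int × Int × Int × Int × Int × Int × Int × Int × Int × Int) : Prop := out = contador_palabras_alt lista_compleja_palabras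
instance (lista_compleja_palabras : List (Int × Int × Bool × String × Int × Int)) (out : Int × Int × Int × Int × Int × Int × Int × Int × Int × Int) : Decidable (Spec_contador_palabras lista_compleja_palabras out) := by unfold Spec_contador_palabras; exact pvDecEq10 _ _

-- ===== CLAIM (what is proved, stated in full; the proofs are below) =====
def Claim_equal_contador_palabras : Prop := ∀ (lista_compleja_palabras : List (Int × Int × Bool × String × Int × Int)), Dom_contador_palabras lista_compleja_palabras → Spec_contador_palabras lista_compleja_palabras (contador_palabras lista_compleja_palabras)

-- ===== LEMMAS AND PROOFS =====
-- componentwise addition on the 9-counter state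
def addV (x y : Int × Int × Int × Int × Int × Int × Int × Int × Int) :
    Int × Int × Int × Int × Int × Int × Int × Int × Int :=
  (x.1 + y.1, x.2.1 + y.2.1, x.2.2.1 + y.2.2.1, x.2.2.2.1 + y.2.2.2.1,
   x.2.2.2.2.1 + y.2.2.2.2.1, x.2.2.2.2.2.1 + y.2.2.2.2.2.1,
   x.2.2.2.2.2.2.1 + y.2.2.2.2.2.2.1, x.2.2.2.2.2.2.2.1 + y.2.2.2.2.2.2.2.1,
   x.2.2.2.2.2.2.2.2 + y.2.2.2.2.2.2.2.2)

def ind (c : Bool) : Int := if c then 1 else 0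

-- the nine counts B computes, as one vector
def countsV (L : List (Int × Int × Bool × String × Int × Int)) :
    Int × Int × Int × Int × Int × Int × Int × Int × Int :=
  (cuenta L (fun p => false == p.2.2.1),
   cuenta L (fun p => true == p.2.2.1),
   cuenta L (fun p => false == p.2.2.1 && p.2.2.2.2.2 == 2),
   cuenta L (fun p => false == p.2.2.1 && p.2.2.2.2.2 == 1),
   cuenta L (fun p => true == p.2.2.1 && p.2.2.2.2.2 == 1),
   cuenta L (fun p => true == p.2.2.1 && p.2.2.2.2.2 > 1 && p.2.2.2.1 == "-1"),
   cuenta L (fun p => true == p.2.2.1 && p.2.2.2.2.2 > 1 && p.2.2.2.1 == "-2"),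
   cuenta L (fun p => true == p.2.2.1 && p.2.2.2.2.2 > 1 && p.2.2.2.1 == "-3"),
   cuenta L (fun p => true == p.2.2.1 && p.2.2.2.2.2 > 1 && p.2.2.2.1 == "-4"))

theorem cuenta_cons (h : Int × Int × Bool × String × Int × Int)
    (t : List (Int × Int × Bool × String × Int × Int))
    (p : (Int × Int × Bool × String × Int × Int) → Bool) :
    cuenta (h :: t) p = cuenta t p + ind (p h) := by
  simp only [cuenta, List.countP_cons, ind]
  split <;> simp

theorem addV_assoc (x y z : Int × Int × Int × Int × Int × Int × Int × Int × Int) :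
    addV (addV x y) z = addV x (addV y z) := by
  simp [addV, add_assoc]

theorem addV_zero_left (x : Int × Int × Int × Int × Int × Int × Int × Int × Int) :
    addV (0, 0, 0, 0, 0, 0, 0, 0, 0) x = x := by
  simp [addV]

-- A's loop body splits as: old state plus the step's contribution from zero
theorem step_split (acc : Int × Int × Int × Int × Int × Int × Int × Int × Int)
    (p : Int × Int × Bool × String × Int × Int) :
    contadorStep acc p = addV acc (contadorStep (0, 0, 0, 0, 0, 0, 0, 0, 0) p) := by
  obtain ⟨at_, to_, bi, am, tm, ag, gr, es, so⟩ := acc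
  obtain ⟨i1, i2, b, tilde, i3, sil⟩ := p
  cases b <;> simp only [contadorStep] <;> split_ifs <;> simp [addV]

-- the step's contribution from zero is exactly the indicator vector of B's predicates
theorem delta_eq (p : Int × Int × Bool × String × Int × Int) :
    contadorStep (0, 0, 0, 0, 0, 0, 0, 0, 0) p =
      (ind (false == p.2.2.1),
       ind (true == p.2.2.1),
       ind (false == p.2.2.1 && p.2.2.2.2.2 == 2),
       ind (false == p.2.2.1 && p.2.2.2.2.2 == 1),
       ind (true == p.2.2.1 && p.2.2.2.2.2 == 1),
       ind (true == p.2.2.1 && p.2.2.2.2.2 > 1 && p.2.2.2.1 == "-1"),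
       ind (true == p.2.2.1 && p.2.2.2.2.2 > 1 && p.2.2.2.1 == "-2"),
       ind (true == p.2.2.1 && p.2.2.2.2.2 > 1 && p.2.2.2.1 == "-3"),
       ind (true == p.2.2.1 && p.2.2.2.2.2 > 1 && p.2.2.2.1 == "-4")) := by
  obtain ⟨i1, i2, b, tilde, i3, sil⟩ := p
  cases b <;> simp only [contadorStep] <;> split_ifs <;> simp_all [ind]

theorem countsV_cons (h : Int × Int × Bool × String × Int × Int)
    (t : List (Int × Int × Bool × String × Int × Int)) :
    countsV (h :: t) = addV (contadorStep (0, 0, 0, 0, 0, 0, 0, 0, 0) h) (countsV t) := by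
  rw [delta_eq]
  simp only [countsV, addV, cuenta_cons]
  refine Prod.ext ?_ (Prod.ext ?_ (Prod.ext ?_ (Prod.ext ?_ (Prod.ext ?_ (Prod.ext ?_
    (Prod.ext ?_ (Prod.ext ?_ ?_))))))) <;> exact add_comm _ _

theorem contador_loop (L : List (Int × Int × Bool × String × Int × Int))
    (acc : Int × Int × Int × Int × Int × Int × Int × Int × Int) :
    L.foldl contadorStep acc = addV acc (countsV L) := by
  induction L generalizing acc with
  | nil => simp [countsV, cuenta, addV]
  | cons h t ih =>
    rw [List.foldl_cons, ih, step_split, addV_assoc, countsV_cons]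

-- ===== VERDICT (by name: the statement is the Claim_ definition above) =====
theorem contador_palabras_spec : Claim_equal_contador_palabras := by
  intro L _
  unfold Spec_contador_palabras contador_palabras contador_palabras_alt
  rw [contador_loop, addV_zero_left]
  rfl
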